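-- pv_equiv track=rewrite | github.com/MattIPv4/BIO18 | Q2.py | generateDial
-- ===== SOURCE A (Python) =====
-- def generateAlphabet():
--     return list(map(chr, range(65, 91))) # Generates alphabet (uppercase)
--
-- def generateDial(n):
--     alphabet = generateAlphabet()
--     dial1 = alphabet.copy()
--     dial2 = {} # Will hold new dial
--     n = n % len(dial1) # Ensure n is a valid index
--     current = 0 # Will hold out last position
--
--     for _ in range(len(dial1)): # Loop through every letter in dial1
--
--         index = n + current - 1 # Start from where we were before, add n
--         index = index % len(dial1) # Ensure valid index
--         current = index # Save our position for next loop
--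
--         letter = dial1[index] # Find the letter
--         dial1.remove(letter) # Remove from dial1
--         dial2[alphabet[_]] = letter # Add to dial2
--
--     return dial2
-- ===== SOURCE B (Python) =====
-- from collections import deque
--
-- def generateDial(n):
--     alphabet = [chr(c) for c in range(65, 91)]
--     d = deque(alphabet)
--     n %= 26
--     dial2 = {}
--     for a in alphabet:
--         d.rotate(-(n - 1))
--         dial2[a] = d.popleft()
--     return dial2
-- ===== Notes on version B (the rewrite author's own statement) =====
-- stated objective: idiomatic
-- what changed: Replaces the index-pointer Josephus loop (compute index = (n+current-1) % len, fetch by index, remove by value) with a collections.deque rotation: rotate left by n-1 and popleft, so the victim is always eliminated from the front and no position pointer or index arithmetic remains.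
import Mathlib
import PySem

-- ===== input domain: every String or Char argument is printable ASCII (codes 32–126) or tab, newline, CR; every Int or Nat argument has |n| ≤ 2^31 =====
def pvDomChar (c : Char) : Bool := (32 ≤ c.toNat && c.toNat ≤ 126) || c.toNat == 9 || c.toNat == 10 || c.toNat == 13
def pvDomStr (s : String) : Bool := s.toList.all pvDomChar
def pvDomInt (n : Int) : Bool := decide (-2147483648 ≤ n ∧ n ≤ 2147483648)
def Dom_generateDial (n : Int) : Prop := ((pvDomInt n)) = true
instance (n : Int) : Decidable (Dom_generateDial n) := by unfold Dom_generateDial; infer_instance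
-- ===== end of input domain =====

-- B replaces A's index-pointer Josephus loop (index arithmetic + remove-by-value) with a
-- deque-rotation simulation that always eliminates from the front (objective: idiomatic).

-- ===== PORT A =====
-- alphabet = list(map(chr, range(65, 91)))
def pvAlphabet : List String :=
  (PySem.List.pyRange 65 91 1).map (fun c => String.mk [Char.ofNat c.toNat])

def generateDial (n : Int) : List (String × String) :=
  let alphabet := pvAlphabet
  let dial1 := alphabet
  let nm := PySem.Int.mod n (dial1.length : Int)
  let st :=
    (PySem.List.pyRange 0 (dial1.length : Int) 1).foldl
      (fun (st : List String × PySem.Dict String String × Int) i =>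
        let dial1 := st.1
        let dial2 := st.2.1
        let current := st.2.2
        let index := PySem.Int.mod (nm + current - 1) (dial1.length : Int)
        -- dial1[index]: the index is mod len, hence always in range, so the IndexError branch is unreachable
        match PySem.List.pyGet? dial1 index with
        | none => st
        | some letter =>
          -- dial1.remove(letter): letter ∈ dial1, so remove? always succeeds
          (((PySem.List.remove? dial1 letter).getD dial1),
           dial2.insert ((PySem.List.pyGet? alphabet i).getD "") letter,
           index))
      (dial1, PySem.Dict.empty, (0 : Int))
  st.2.1.items

-- ===== PORT B =====
-- deque rotate(-(k)) = rotate left by k (Python's rotate handles any magnitude, and n-1 may be -1)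
def pvRotL (l : List String) (k : Int) : List String :=
  if l.isEmpty then l
  else
    let m := (PySem.Int.mod k (l.length : Int)).toNat
    l.drop m ++ l.take m

def generateDial_alt (n : Int) : List (String × String) :=
  let alphabet := (PySem.List.pyRange 65 91 1).map (fun c => String.mk [Char.ofNat c.toNat])
  let nm := PySem.Int.mod n 26
  let st :=
    alphabet.foldl
      (fun (st : List String × PySem.Dict String String) a =>
        match pvRotL st.1 (nm - 1) with
        | [] => st          -- unreachable: the deque holds ≥ 1 element throughout the 26 steps
        | x :: rest => (rest, st.2.insert a x))
      (alphabet, PySem.Dict.empty)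
  st.2.items

-- ===== PRECONDITION & SPEC =====
def Spec_generateDial (n : Int) (out : List (String × String)) : Prop := out = generateDial_alt n
instance (n : Int) (out : List (String × String)) : Decidable (Spec_generateDial n out) := by unfold Spec_generateDial; infer_instance

-- ===== CLAIM (what is proved, stated in full; the proofs are below) =====
def Claim_equal_generateDial : Prop := ∀ (n : Int), Dom_generateDial n → Spec_generateDial n (generateDial n)

-- ===== LEMMAS AND PROOFS =====
theorem pv_mod_idem (n : Int) :
    PySem.Int.mod (PySem.Int.mod n 26) 26 = PySem.Int.mod n 26 := by
  have h0 : (0:Int) < 26 := by norm_num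
  rw [PySem.Int.mod_eq_emod_of_pos h0, PySem.Int.mod_eq_emod_of_pos h0,
      Int.emod_emod_of_dvd _ (dvd_refl _)]

theorem pvA_mod (n : Int) : generateDial n = generateDial (PySem.Int.mod n 26) := by
  have hlen : ((pvAlphabet.length : Nat) : Int) = 26 := by decide
  unfold generateDial
  simp only [hlen, pv_mod_idem]

theorem pvB_mod (n : Int) : generateDial_alt n = generateDial_alt (PySem.Int.mod n 26) := by
  unfold generateDial_alt
  simp only [pv_mod_idem]

set_option maxHeartbeats 4000000 in
set_option maxRecDepth 100000 in
theorem pv_key : ∀ k : Fin 26, generateDial ((k.val : Nat) : Int) = generateDial_alt ((k.val : Nat) : Int) := by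
  decide

theorem generateDial_spec' (n : Int) : generateDial n = generateDial_alt n := by
  have h0 : (0:Int) < 26 := by norm_num
  have hnn := PySem.Int.mod_nonneg n h0
  have hlt := PySem.Int.mod_lt n h0
  rw [pvA_mod n, pvB_mod n]
  have hk : (PySem.Int.mod n 26) = (((PySem.Int.mod n 26).toNat : Nat) : Int) := by
    omega
  rw [hk]
  exact pv_key ⟨(PySem.Int.mod n 26).toNat, by omega⟩

-- ===== VERDICT (by name: the statement is the Claim_ definition above) =====
theorem generateDial_spec : Claim_equal_generateDial := by
  intro n _
  exact generateDial_spec' n
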